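-- pv_equiv track=rewrite | github.com/khuramgill/Ai-Labs | Lab 3/Lab3-2022-CS-48.py | balance_brackets_recursive
-- ===== SOURCE A (Python) =====
-- def balance_brackets_recursive(sequence, index=0, open_count=0, close_count=0):
--     if index == len(sequence):
--         # Return corrected sequence with extra parentheses if needed
--         return '(' * close_count + sequence + ')' * open_count
--
--     char = sequence[index]
--     if char == '(':
--         return balance_brackets_recursive(sequence, index + 1, open_count + 1, close_count)
--     elif char == ')':
--         if open_count > 0:
--             return balance_brackets_recursive(sequence, index + 1, open_count - 1, close_count)
--         else:
--             return balance_brackets_recursive(sequence, index + 1, open_count, close_count + 1)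
--     else:
--         return balance_brackets_recursive(sequence, index + 1, open_count, close_count)
-- ===== SOURCE B (Python) =====
-- def balance_brackets_recursive(sequence, index=0, open_count=0, close_count=0):
--     for i in range(index, len(sequence)):
--         char = sequence[i]
--         if char == '(':
--             open_count += 1
--         elif char == ')':
--             if open_count > 0:
--                 open_count -= 1
--             else:
--                 close_count += 1
--     return '(' * close_count + sequence + ')' * open_count
-- ===== Notes on version B (the rewrite author's own statement) =====
-- stated objective: idiomatic
-- what changed: Replaced the tail recursion carrying index/open_count/close_count (which hits Python's recursion limit on long inputs) with a single for-loop over range(index, len(sequence)) updating the two counters, then the same padded-concatenation return.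
import Mathlib
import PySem

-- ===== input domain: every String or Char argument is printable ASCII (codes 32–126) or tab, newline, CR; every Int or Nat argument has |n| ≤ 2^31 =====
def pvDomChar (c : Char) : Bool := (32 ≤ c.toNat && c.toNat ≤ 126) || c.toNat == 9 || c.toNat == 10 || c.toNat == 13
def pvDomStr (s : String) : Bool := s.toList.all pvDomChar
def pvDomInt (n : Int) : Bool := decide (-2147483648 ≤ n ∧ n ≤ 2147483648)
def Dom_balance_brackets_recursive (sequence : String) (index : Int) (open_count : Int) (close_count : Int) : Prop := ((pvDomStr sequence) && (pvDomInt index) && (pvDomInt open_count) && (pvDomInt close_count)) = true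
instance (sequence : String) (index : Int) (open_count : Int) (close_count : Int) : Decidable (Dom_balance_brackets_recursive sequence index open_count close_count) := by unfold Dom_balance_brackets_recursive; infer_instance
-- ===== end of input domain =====

-- B replaces A's tail recursion by a single loop over the indices with two counters
-- (objective: idiomatic; no recursion-depth limit). Return value only; no mutation.

-- ===== PORT A =====
-- A's tail recursion, step for step; '""' marks where Python raises IndexError (outside Pre_).
def bbrA_go (s : List Char) (index oc cc : Int) : String :=
  if index = (s.length : Int) then
    String.ofList (List.replicate cc.toNat '(' ++ s ++ List.replicate oc.toNat ')')
  else
    match h : PySem.List.pyGet? s index with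
    | none => ""  -- Python raises IndexError here
    | some c =>
      if c = '(' then bbrA_go s (index + 1) (oc + 1) cc
      else if c = ')' then
        if oc > 0 then bbrA_go s (index + 1) (oc - 1) cc
        else bbrA_go s (index + 1) oc (cc + 1)
      else bbrA_go s (index + 1) oc cc
termination_by ((s.length : Int) - index).toNat
decreasing_by
  all_goals
    have hin : ¬ ¬ PySem.Raise.InRange s.length index := by
      intro hn; rw [← PySem.List.pyGet?_eq_none_iff (xs := s) (i := index)] at hn
      simp [hn] at h
    have : index < (s.length : Int) := by
      unfold PySem.Raise.InRange at hin; omega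
    omega

def balance_brackets_recursive (sequence : String) (index : Int) (open_count : Int) (close_count : Int) : String :=
  bbrA_go sequence.toList index open_count close_count

-- ===== PORT B =====
-- B's loop: fold the step over range(index, len(sequence)) carrying (open_count, close_count).
def bbrB_step (s : List Char) (p : Int × Int) (i : Int) : Int × Int :=
  let c := PySem.List.pyGetD s i ' '
  if c = '(' then (p.1 + 1, p.2)
  else if c = ')' then
    if p.1 > 0 then (p.1 - 1, p.2) else (p.1, p.2 + 1)
  else p

def balance_brackets_recursive_alt (sequence : String) (index : Int) (open_count : Int) (close_count : Int) : String :=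
  let s := sequence.toList
  let p := (PySem.List.pyRange index (s.length : Int) 1).foldl (bbrB_step s) (open_count, close_count)
  String.ofList (List.replicate p.2.toNat '(' ++ s ++ List.replicate p.1.toNat ')')

-- ===== PRECONDITION & SPEC =====
-- Pre_ excludes exactly the inputs where A raises IndexError (index out of range, i.e. |index| > len).
def Pre_balance_brackets_recursive (sequence : String) (index : Int) (open_count : Int) (close_count : Int) : Prop :=
  -(sequence.toList.length : Int) ≤ index ∧ index ≤ (sequence.toList.length : Int)
instance (sequence : String) (index : Int) (open_count : Int) (close_count : Int) : Decidable (Pre_balance_brackets_recursive sequence index open_count close_count) := by unfold Pre_balance_brackets_recursive; infer_instance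

def pvWitness_balance_brackets_recursive : String × Int × Int × Int := ("(()a)", 0, 0, 0)

def Spec_balance_brackets_recursive (sequence : String) (index : Int) (open_count : Int) (close_count : Int) (out : String) : Prop := out = balance_brackets_recursive_alt sequence index open_count close_count
instance (sequence : String) (index : Int) (open_count : Int) (close_count : Int) (out : String) : Decidable (Spec_balance_brackets_recursive sequence index open_count close_count out) := by unfold Spec_balance_brackets_recursive; infer_instance

-- ===== CLAIM (what is proved, stated in full; the proofs are below) =====
def Claim_equal_balance_brackets_recursive : Prop := ∀ (sequence : String) (index : Int) (open_count : Int) (close_count : Int), Dom_balance_brackets_recursive sequence index open_count close_count → Pre_balance_brackets_recursive sequence index open_count close_count → Spec_balance_brackets_recursive sequence index open_count close_count (balance_brackets_recursive sequence index open_count close_count)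


-- ===== LEMMAS AND PROOFS =====

-- A's recursion from position `index` equals B's fold over range(index, len s).
theorem bbrA_go_eq_fold (s : List Char) (index oc cc : Int)
    (h1 : -(s.length : Int) ≤ index) (h2 : index ≤ (s.length : Int)) :
    bbrA_go s index oc cc =
      (let p := (PySem.List.pyRange index (s.length : Int) 1).foldl (bbrB_step s) (oc, cc)
       String.ofList (List.replicate p.2.toNat '(' ++ s ++ List.replicate p.1.toNat ')')) := by
  by_cases hend : index = (s.length : Int)
  · subst hend
    rw [bbrA_go, PySem.List.pyRange_one_eq_nil (le_refl _)]
    simp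
  · have hlt : index < (s.length : Int) := lt_of_le_of_ne h2 hend
    have hin : PySem.Raise.InRange s.length index := by
      unfold PySem.Raise.InRange; omega
    have ih := fun oc' cc' => bbrA_go_eq_fold s (index + 1) oc' cc' (by omega) (by omega)
    rw [bbrA_go]
    simp only [if_neg hend]
    rw [PySem.List.pyRange_one_cons hlt]
    split
    · next hnone =>
      exact absurd ((PySem.List.pyGet?_eq_none_iff s index).mp hnone) (not_not_intro hin)
    · next c hc =>
      have hgd : PySem.List.pyGetD s index ' ' = c := by
        simp [PySem.List.pyGetD, hc]
      simp only [List.foldl_cons, bbrB_step, hgd]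
      by_cases h1c : c = '('
      · simp only [if_pos h1c, ih]
      · by_cases h2c : c = ')'
        · simp only [if_neg h1c, if_pos h2c]
          by_cases h3c : oc > 0
          · simp only [if_pos h3c, ih]
          · simp only [if_neg h3c, ih]
        · simp only [if_neg h1c, if_neg h2c, ih]
termination_by ((s.length : Int) - index).toNat
decreasing_by omega

-- ===== VERDICT (by name: the statement is the Claim_ definition above) =====
theorem balance_brackets_recursive_spec : Claim_equal_balance_brackets_recursive := by
  intro sequence index oc cc _ hpre
  unfold Spec_balance_brackets_recursive balance_brackets_recursive balance_brackets_recursive_alt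
  exact bbrA_go_eq_fold sequence.toList index oc cc hpre.1 hpre.2
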